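-- pv_equiv track=rewrite | github.com/SeanMemery/llm_router | dashboard/jobs.py | _replace_flag_value
-- ===== SOURCE A (Python) =====
-- from typing import Any, Literal
--
-- def _replace_flag_value(argv: Any, flag: str, replacement: str) -> list[str]:
--     values = [str(item) for item in list(argv or [])]
--     if flag not in values:
--         return values
--     index = values.index(flag)
--     if index + 1 >= len(values):
--         return values
--     updated = list(values)
--     updated[index + 1] = replacement
--     return updated
-- ===== SOURCE B (Python) =====
-- def _replace_flag_value(argv, flag, replacement):
--     values = [str(item) for item in list(argv or [])]
--     out = []
--     replaced = False
--     replace_next = False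
--     for item in values:
--         if replace_next:
--             out.append(replacement)
--             replaced = True
--             replace_next = False
--         elif not replaced and item == flag:
--             out.append(item)
--             replace_next = True
--         else:
--             out.append(item)
--     return out
-- ===== Notes on version B (the rewrite author's own statement) =====
-- stated objective: alternative
-- what changed: Replaced the membership-test + .index scan + copy-and-assign with a single streaming pass that builds the output with two state flags (replaced / replace_next).
import Mathlib
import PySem

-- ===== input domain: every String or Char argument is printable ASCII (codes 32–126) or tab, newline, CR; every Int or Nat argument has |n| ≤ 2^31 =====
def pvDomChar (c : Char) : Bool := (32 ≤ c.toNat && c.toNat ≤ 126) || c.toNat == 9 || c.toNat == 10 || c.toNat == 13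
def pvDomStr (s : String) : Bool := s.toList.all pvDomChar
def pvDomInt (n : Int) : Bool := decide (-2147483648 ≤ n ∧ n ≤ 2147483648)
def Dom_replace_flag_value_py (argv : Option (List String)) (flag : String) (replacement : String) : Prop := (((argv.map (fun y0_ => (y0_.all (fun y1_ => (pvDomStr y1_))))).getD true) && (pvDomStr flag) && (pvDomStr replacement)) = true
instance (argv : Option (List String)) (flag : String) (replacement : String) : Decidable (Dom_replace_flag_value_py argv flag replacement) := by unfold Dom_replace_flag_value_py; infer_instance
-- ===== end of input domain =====

-- B replaces A's membership test + .index scan + copy-and-assign by a single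
-- streaming pass with two state flags; same return value everywhere (alternative decomposition).

-- ===== PORT A =====
-- values = [str(item) for item in list(argv or [])]   (str on a str is the identity)
def replace_flag_value_py (argv : Option (List String)) (flag : String) (replacement : String) : List String :=
  let values := (argv.getD []).map (fun s => s)
  if flag ∈ values then
    match PySem.List.index? values flag with
    | none => values                                   -- unreachable: flag ∈ values
    | some index =>
      if values.length ≤ index + 1 then values         -- index + 1 >= len(values)
      else values.set (index + 1) replacement          -- updated[index+1] = replacement
  else values

-- ===== PORT B =====
-- single pass; state = (out, replaced, replace_next)
def replace_flag_value_py_alt (argv : Option (List String)) (flag : String) (replacement : String) : List String :=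
  let values := (argv.getD []).map (fun s => s)
  (values.foldl
    (fun (st : List String × Bool × Bool) item =>
      if st.2.2 then (st.1 ++ [replacement], true, false)
      else if !st.2.1 && item == flag then (st.1 ++ [item], st.2.1, true)
      else (st.1 ++ [item], st.2.1, false))
    ([], false, false)).1

-- ===== PRECONDITION & SPEC =====
def Spec_replace_flag_value_py (argv : Option (List String)) (flag : String) (replacement : String) (out : List String) : Prop := out = replace_flag_value_py_alt argv flag replacement
instance (argv : Option (List String)) (flag : String) (replacement : String) (out : List String) : Decidable (Spec_replace_flag_value_py argv flag replacement out) := by unfold Spec_replace_flag_value_py; infer_instance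

-- ===== CLAIM (what is proved, stated in full; the proofs are below) =====
def Claim_equal_replace_flag_value_py : Prop := ∀ (argv : Option (List String)) (flag : String) (replacement : String), Dom_replace_flag_value_py argv flag replacement → Spec_replace_flag_value_py argv flag replacement (replace_flag_value_py argv flag replacement)

-- ===== LEMMAS AND PROOFS =====

-- recursive characterisation of B's single pass (proof-only helper)
def bcore (flag replacement : String) : List String → List String
  | [] => []
  | x :: xs =>
    if x == flag then x :: (match xs with | [] => [] | _ :: ys => replacement :: ys)
    else x :: bcore flag replacement xs

def bstep (flag replacement : String) : List String × Bool × Bool → String → List String × Bool × Bool :=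
  fun st item =>
    if st.2.2 then (st.1 ++ [replacement], true, false)
    else if !st.2.1 && item == flag then (st.1 ++ [item], st.2.1, true)
    else (st.1 ++ [item], st.2.1, false)

theorem bfold_done (flag replacement : String) (l acc : List String) :
    (l.foldl (bstep flag replacement) (acc, true, false)).1 = acc ++ l := by
  induction l generalizing acc with
  | nil => simp
  | cons x xs ih => simp [List.foldl, bstep, ih]

theorem bfold_fresh (flag replacement : String) (l acc : List String) :
    (l.foldl (bstep flag replacement) (acc, false, false)).1 = acc ++ bcore flag replacement l := by
  induction l generalizing acc with
  | nil => simp [bcore]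
  | cons x xs ih =>
    by_cases h : x == flag
    · cases xs with
      | nil => simp [List.foldl, bstep, bcore, h]
      | cons y ys => simp [List.foldl, bstep, bcore, h, bfold_done]
    · simp [List.foldl, bstep, bcore, h, ih]

theorem acore_eq_bcore (flag replacement : String) (l : List String) :
    (if flag ∈ l then
      match PySem.List.index? l flag with
      | none => l
      | some index =>
        if l.length ≤ index + 1 then l
        else l.set (index + 1) replacement
     else l) = bcore flag replacement l := by
  induction l with
  | nil => simp [bcore]
  | cons x xs ih =>
    by_cases h : x = flag
    · subst h
      rw [PySem.List.index?_cons_self]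
      cases xs with
      | nil => simp [bcore]
      | cons y ys => simp [bcore, List.set]
    · rw [PySem.List.index?_cons_of_ne xs h]
      by_cases hm : flag ∈ xs
      · obtain ⟨i, hi⟩ := Option.isSome_iff_exists.mp ((PySem.List.index?_isSome_iff xs flag).mpr hm)
        rw [hi] at ih ⊢
        have hx : flag ∈ x :: xs := List.mem_cons_of_mem _ hm
        rw [if_pos hm] at ih
        simp only [Option.map_some, if_pos hx, bcore, beq_iff_eq, if_neg h, ← ih]
        have hlen : ((x :: xs).length ≤ i + 1 + 1) ↔ (xs.length ≤ i + 1) := by simp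
        by_cases hc : xs.length ≤ i + 1
        · rw [if_pos (hlen.mpr hc), if_pos hc]
        · rw [if_neg (fun hh => hc (hlen.mp hh)), if_neg hc]
          simp [List.set]
      · have hx : flag ∉ x :: xs := by
          simp only [List.mem_cons, not_or]
          exact ⟨fun hh => h hh.symm, hm⟩
        rw [if_neg hx]
        rw [if_neg hm] at ih
        simp [bcore, h, ← ih]

-- ===== VERDICT (by name: the statement is the Claim_ definition above) =====
theorem replace_flag_value_py_spec : Claim_equal_replace_flag_value_py := by
  intro argv flag replacement _
  show _ = _
  unfold replace_flag_value_py replace_flag_value_py_alt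
  simp only [List.map_id']
  rw [show (fun (st : List String × Bool × Bool) item =>
      if st.2.2 then (st.1 ++ [replacement], true, false)
      else if !st.2.1 && item == flag then (st.1 ++ [item], st.2.1, true)
      else (st.1 ++ [item], st.2.1, false)) = bstep flag replacement from rfl]
  rw [bfold_fresh, List.nil_append, acore_eq_bcore]
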